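-- pv_equiv track=rewrite | github.com/yoursin0330/code-practice | 프로그래머스/2/42584. 주식가격/주식가격.py | solution
-- ===== SOURCE A (Python) =====
-- def solution(prices):
--     answer = [0]*len(prices)
--     for i in range(0, len(prices)-1):
--         j = i+1
--         while j< len(prices):
--             if prices[i]>prices[j]:
--                 answer[i]=j-i
--                 break
--             j+=1
--         if j==len(prices):
--             answer[i]=len(prices)-i-1
--     return answer
-- ===== SOURCE B (Python) =====
-- def solution(prices):
--     n = len(prices)
--     answer = [0] * n
--     stack = []
--     for j in range(n):
--         p = prices[j]
--         while stack and prices[stack[-1]] > p: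
--             i = stack.pop()
--             answer[i] = j - i
--         stack.append(j)
--     for i in stack:
--         answer[i] = n - 1 - i
--     return answer
-- ===== Notes on version B (the rewrite author's own statement) =====
-- stated objective: faster
-- what changed: Replaced A's per-index forward rescan (for each i, scan ahead until a lower price) by a single left-to-right pass with a monotonic index stack: pop indices whose price exceeds the current one and record their durations, then flush the stack at the end.
import Mathlib
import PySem

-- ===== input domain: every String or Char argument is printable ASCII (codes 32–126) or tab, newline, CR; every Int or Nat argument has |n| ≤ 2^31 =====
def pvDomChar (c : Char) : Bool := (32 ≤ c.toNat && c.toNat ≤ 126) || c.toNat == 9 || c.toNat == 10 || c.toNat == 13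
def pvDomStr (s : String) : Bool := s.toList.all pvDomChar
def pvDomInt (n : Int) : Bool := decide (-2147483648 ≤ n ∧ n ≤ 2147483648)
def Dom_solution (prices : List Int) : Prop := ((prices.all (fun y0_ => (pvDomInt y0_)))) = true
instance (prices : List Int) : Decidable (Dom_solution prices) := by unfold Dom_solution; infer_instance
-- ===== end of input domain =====

-- B replaces A's quadratic per-index forward rescan by a one-pass monotonic index stack (objective: faster, asymptotic).

-- ===== PORT A =====
-- A's inner `while j < len(prices)` loop: returns the breaking j (first j with prices[i] > prices[j]), none when j reaches len(prices)
def innerA (prices : List Int) (i j : Nat) : Option Nat :=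
  if _h : j < prices.length then
    if prices[i]! > prices[j]! then some j else innerA prices i (j+1)
  else none
termination_by prices.length - j

def solution (prices : List Int) : List Int :=
  (List.range (prices.length - 1)).foldl
    (fun answer i =>
      match innerA prices i (i+1) with
      | some j => answer.set i ((j : Int) - (i : Nat))            -- break: answer[i] = j-i (j < len, so the j==len branch is skipped)
      | none   => answer.set i ((prices.length : Int) - (i : Nat) - 1))  -- j == len(prices): answer[i] = len-i-1
    (List.replicate prices.length 0)

-- ===== PORT B =====
-- Source B's inner `while stack and prices[stack[-1]] > p` loop; stack head = top
def popAll (prices : List Int) (j : Nat) (ans : List Int) (st : List Nat) : List Int × List Nat :=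
  match st with
  | [] => (ans, [])
  | i :: rest =>
      if prices[i]! > prices[j]! then popAll prices j (ans.set i ((j : Int) - (i : Nat))) rest
      else (ans, i :: rest)

def stepB (prices : List Int) (s : List Int × List Nat) (j : Nat) : List Int × List Nat :=
  match popAll prices j s.1 s.2 with
  | (ans, st) => (ans, j :: st)

def solution_alt (prices : List Int) : List Int :=
  match (List.range prices.length).foldl (stepB prices) (List.replicate prices.length 0, []) with
  | (ans, st) => st.foldl (fun a i => a.set i ((prices.length : Int) - 1 - (i : Nat))) ans

-- ===== PRECONDITION & SPEC =====
def Spec_solution (prices : List Int) (out : List Int) : Prop := out = solution_alt prices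
instance (prices : List Int) (out : List Int) : Decidable (Spec_solution prices out) := by unfold Spec_solution; infer_instance

-- ===== CLAIM (what is proved, stated in full; the proofs are below) =====
def Claim_equal_solution : Prop := ∀ (prices : List Int), Dom_solution prices → Spec_solution prices (solution prices)

-- ===== LEMMAS AND PROOFS =====

-- `good prices i j`: no price drop for index i strictly before position j
def good (prices : List Int) (i j : Nat) : Prop := ∀ k, i < k → k < j → prices[i]! ≤ prices[k]!

def goodb (prices : List Int) (i j : Nat) : Bool :=
  (List.range' (i+1) (j - (i+1))).all (fun k => decide (prices[i]! ≤ prices[k]!))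

-- first drop position for index i, as an Option
def fd (prices : List Int) (i : Nat) : Option Nat :=
  (List.range' (i+1) (prices.length - (i+1))).find? (fun k => decide (prices[i]! > prices[k]!))

def specV (prices : List Int) (i : Nat) : Int :=
  match fd prices i with
  | some j => (j : Int) - (i : Nat)
  | none   => (prices.length : Int) - 1 - (i : Nat)

lemma goodb_iff (prices : List Int) (i j : Nat) : goodb prices i j = true ↔ good prices i j := by
  unfold goodb good
  simp only [List.all_eq_true, List.mem_range'_1, decide_eq_true_eq]
  constructor
  · intro h k h1 h2
    exact h k ⟨h1, by omega⟩
  · rintro h k ⟨h1, h2⟩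
    exact h k h1 (by omega)

lemma goodb_false_iff (prices : List Int) (i j : Nat) :
    goodb prices i j = false ↔ ¬ good prices i j := by
  rw [Bool.eq_false_iff]
  exact not_congr (goodb_iff prices i j)

-- generic: foldl that sets each listed index to a value depending only on the index
lemma foldl_set_length (g : Nat → Int) (L : List Nat) (ans : List Int) :
    (L.foldl (fun a i => a.set i (g i)) ans).length = ans.length := by
  induction L generalizing ans with
  | nil => rfl
  | cons a t ih => simpa [List.foldl] using ih (ans.set a (g a))

lemma foldl_set_getElem? (g : Nat → Int) (L : List Nat) (ans : List Int) (k : Nat)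
    (hk : k < ans.length) :
    (L.foldl (fun a i => a.set i (g i)) ans)[k]? =
      if k ∈ L then some (g k) else ans[k]? := by
  induction L generalizing ans with
  | nil => simp
  | cons a t ih =>
    simp only [List.foldl_cons]
    rw [ih (ans.set a (g a)) (by simpa using hk)]
    by_cases hmem : k ∈ t
    · simp [hmem]
    · by_cases hak : a = k
      · subst hak
        rw [if_neg hmem, List.getElem?_set, if_pos rfl, if_pos hk, if_pos (by simp)]
      · rw [if_neg hmem, List.getElem?_set, if_neg hak,
            if_neg (by simp [hmem, Ne.symm hak])]

-- find? on a contiguous range hits the least satisfying element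
lemma find?_range'_eq_some (p : Nat → Bool) (j : Nat) :
    ∀ len s, s ≤ j → j < s + len → p j = true → (∀ k, s ≤ k → k < j → p k = false) →
      (List.range' s len).find? p = some j := by
  intro len
  induction len with
  | zero => intro s h1 h2; omega
  | succ m ih =>
    intro s h1 h2 hp hbefore
    rw [List.range'_succ]
    by_cases hsj : s = j
    · subst hsj; simp [List.find?, hp]
    · have hps : p s = false := hbefore s le_rfl (by omega)
      simp only [List.find?, hps]
      exact ih (s+1) (by omega) (by omega) hp (fun k hk1 hk2 => hbefore k (by omega) hk2)

lemma fd_eq_some (prices : List Int) (i j : Nat) (hj : j < prices.length) (hij : i < j)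
    (hg : good prices i j) (hp : prices[i]! > prices[j]!) : fd prices i = some j := by
  unfold fd
  apply find?_range'_eq_some
  · omega
  · omega
  · exact decide_eq_true hp
  · intro k h1 h2
    simp only [decide_eq_false_iff_not, not_lt]
    exact hg k (by omega) h2

lemma fd_eq_none (prices : List Int) (i : Nat) (hg : good prices i prices.length) :
    fd prices i = none := by
  unfold fd
  rw [List.find?_eq_none]
  intro k hk
  simp only [List.mem_range'_1] at hk
  exact fun h => absurd (of_decide_eq_true h) (not_lt.mpr (hg k (by omega) (by omega)))

-- A's inner while-loop equals find? over the remaining range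
lemma innerA_eq_find? (prices : List Int) (i : Nat) : ∀ m j, m = prices.length - j →
    innerA prices i j = (List.range' j m).find? (fun k => decide (prices[i]! > prices[k]!)) := by
  intro m
  induction m with
  | zero =>
    intro j hm
    rw [innerA]
    have : ¬ j < prices.length := by omega
    simp [this]
  | succ m ih =>
    intro j hm
    have hj : j < prices.length := by omega
    rw [innerA, dif_pos hj, List.range'_succ, List.find?_cons]
    by_cases hp : prices[i]! > prices[j]!
    · rw [if_pos hp, decide_eq_true hp]
    · rw [if_neg hp, decide_eq_false hp]
      exact ih (j+1) (by omega)

lemma innerA_eq_fd (prices : List Int) (i : Nat) : innerA prices i (i+1) = fd prices i :=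
  innerA_eq_find? prices i (prices.length - (i+1)) (i+1) rfl

-- the step function of A's fold, in value form
lemma stepA_eq (prices : List Int) :
    (fun (answer : List Int) (i : Nat) =>
      match innerA prices i (i+1) with
      | some j => answer.set i ((j : Int) - (i : Nat))
      | none   => answer.set i ((prices.length : Int) - (i : Nat) - 1)) =
    (fun a i => a.set i (match innerA prices i (i+1) with
      | some j => ((j : Int) - (i : Nat))
      | none   => ((prices.length : Int) - (i : Nat) - 1))) := by
  funext a i; cases innerA prices i (i+1) <;> rfl

lemma solutionA_length (prices : List Int) : (solution prices).length = prices.length := by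
  unfold solution
  rw [stepA_eq]
  simp [foldl_set_length]

lemma specV_last (prices : List Int) (hp : 0 < prices.length) :
    specV prices (prices.length - 1) = 0 := by
  have h : fd prices (prices.length - 1) = none := by
    unfold fd
    have h0 : prices.length - (prices.length - 1 + 1) = 0 := by omega
    simp [h0]
  unfold specV
  rw [h]
  have : ((prices.length - 1 : Nat) : Int) = (prices.length : Int) - 1 := by omega
  rw [this]; ring

lemma solutionA_getElem? (prices : List Int) (k : Nat) (hk : k < prices.length) :
    (solution prices)[k]? = some (specV prices k) := by
  unfold solution
  rw [stepA_eq, foldl_set_getElem? _ _ _ k (by simpa using hk)]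
  by_cases hmem : k ∈ List.range (prices.length - 1)
  · rw [if_pos hmem, innerA_eq_fd]
    unfold specV
    cases fd prices k with
    | some j => rfl
    | none => simp only [Option.some.injEq]; ring
  · rw [if_neg hmem]
    have hkeq : k = prices.length - 1 := by
      simp only [List.mem_range] at hmem; omega
    subst hkeq
    rw [specV_last prices (by omega)]
    simp [hk]

-- popAll = (set the takeWhile-prefix, keep the dropWhile-suffix)
lemma popAll_spec (prices : List Int) (j : Nat) (st : List Nat) : ∀ ans,
    popAll prices j ans st =
      ((st.takeWhile (fun i => decide (prices[i]! > prices[j]!))).foldl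
          (fun a i => a.set i ((j : Int) - (i : Nat))) ans,
        st.dropWhile (fun i => decide (prices[i]! > prices[j]!))) := by
  induction st with
  | nil => intro ans; rfl
  | cons a t ih =>
    intro ans
    rw [List.takeWhile_cons, List.dropWhile_cons, popAll]
    by_cases hp : prices[a]! > prices[j]!
    · rw [if_pos hp, decide_eq_true hp, if_pos rfl, if_pos rfl, List.foldl_cons, ih]
    · rw [if_neg hp, decide_eq_false hp, if_neg (by simp), if_neg (by simp), List.foldl_nil]

-- on a list where the predicate is antitone along positions, takeWhile/dropWhile are filters
lemma takeWhile_eq_filter_of_pairwise {α : Type} (P : α → Bool) (l : List α)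
    (h : l.Pairwise (fun a b => P b = true → P a = true)) :
    l.takeWhile P = l.filter P ∧ l.dropWhile P = l.filter (fun x => !P x) := by
  induction l with
  | nil => exact ⟨rfl, rfl⟩
  | cons a t ih =>
    rcases List.pairwise_cons.mp h with ⟨ha, ht⟩
    rcases ih ht with ⟨h1, h2⟩
    by_cases hp : P a = true
    · simp [hp, h1, h2]
    · have hall : ∀ b ∈ t, ¬ P b = true := fun b hb hPb => hp (ha b hb hPb)
      constructor
      · simp only [List.takeWhile_cons, hp, List.filter_cons]
        rw [List.filter_eq_nil_iff.mpr hall]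
        simp
      · simp only [List.dropWhile_cons, hp, List.filter_cons]
        rw [List.filter_eq_self.mpr (fun b hb => by simp [hall b hb])]
        simp

-- the B-fold invariant
lemma invB (prices : List Int) : ∀ j, j ≤ prices.length →
    ((List.range j).foldl (stepB prices) (List.replicate prices.length 0, [])).2 =
      ((List.range j).filter (fun i => goodb prices i j)).reverse ∧
    ((List.range j).foldl (stepB prices) (List.replicate prices.length 0, [])).1.length = prices.length ∧
    ∀ k, k < prices.length →
      ((List.range j).foldl (stepB prices) (List.replicate prices.length 0, [])).1[k]? =
        some (if k < j ∧ goodb prices k j = false then specV prices k else 0) := by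
  intro j
  induction j with
  | zero =>
    intro _
    refine ⟨rfl, by simp, ?_⟩
    intro k hk
    simp [hk]
  | succ j ih =>
    intro hj1
    have hj : j < prices.length := by omega
    obtain ⟨hst, hlen, hans⟩ := ih (by omega)
    rw [List.range_succ, List.foldl_append, List.foldl_cons, List.foldl_nil]
    set s := (List.range j).foldl (stepB prices) (List.replicate prices.length 0, []) with hs
    set P : Nat → Bool := fun i => decide (prices[i]! > prices[j]!) with hP
    have hpair : s.2.Pairwise (fun a b => P b = true → P a = true) := by
      rw [hst, List.pairwise_reverse]
      have hbase : (List.range j).Pairwise (· < ·) := List.pairwise_lt_range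
      have hfilt := List.Pairwise.filter (p := fun i => goodb prices i j) hbase
      refine List.Pairwise.imp_of_mem ?_ hfilt
      intro a b ha hb hab
      have hga : good prices a j := (goodb_iff _ _ _).mp (List.mem_filter.mp ha).2
      have hbj : b < j := by simpa using (List.mem_filter.mp hb).1
      intro hPa
      simp only [hP, decide_eq_true_eq] at hPa ⊢
      have : prices[a]! ≤ prices[b]! := hga b hab hbj
      omega
    have hpop := popAll_spec prices j s.2 s.1
    obtain ⟨htake, hdrop⟩ := takeWhile_eq_filter_of_pairwise P s.2 hpair
    have hstep : stepB prices s j =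
        ((s.2.filter P).foldl (fun a i => a.set i ((j : Int) - (i : Nat))) s.1,
          j :: s.2.filter (fun x => !P x)) := by
      unfold stepB
      rw [hpop, htake, hdrop]
    rw [hstep]
    dsimp only
    have hmem_st : ∀ i, i ∈ s.2 ↔ (i < j ∧ good prices i j) := by
      intro i
      rw [hst]
      simp only [List.mem_reverse, List.mem_filter, List.mem_range, goodb_iff]
    refine ⟨?_, ?_, ?_⟩
    · -- new stack
      rw [hst, List.filter_reverse, List.filter_append]
      have hgj : goodb prices j (j+1) = true := by
        rw [goodb_iff]; intro k h1 h2; omega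
      rw [show (List.filter (fun i => goodb prices i (j+1)) [j]) = [j] from by simp [hgj]]
      rw [List.reverse_append, List.filter_filter]
      simp only [List.reverse_cons, List.reverse_nil, List.nil_append, List.singleton_append]
      congr 1
      congr 1
      apply List.filter_congr
      intro i hi
      simp only [List.mem_range] at hi
      have hrange : List.range' (i+1) (j+1 - (i+1)) = List.range' (i+1) (j - (i+1)) ++ [j] := by
        have h1 : j + 1 - (i+1) = (j - (i+1)) + 1 := by omega
        have h2 : (i+1) + (j - (i+1)) = j := by omega
        rw [h1, List.range'_1_concat, h2]
      show (!P i && goodb prices i j) = goodb prices i (j+1)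
      unfold goodb
      rw [hrange, List.all_append]
      simp only [List.all_cons, List.all_nil, Bool.and_true, hP]
      rw [show (decide (prices[i]! ≤ prices[j]!)) = !decide (prices[i]! > prices[j]!) from by
        by_cases h : prices[i]! ≤ prices[j]!
        · rw [decide_eq_true h, decide_eq_false (not_lt.mpr h)]; rfl
        · rw [decide_eq_false h, decide_eq_true (not_le.mp h)]; rfl]
      rw [Bool.and_comm]
    · rw [foldl_set_length]; exact hlen
    · intro k hk
      rw [foldl_set_getElem? _ _ _ k (by omega)]
      by_cases hmem : k ∈ s.2.filter P
      · rw [if_pos hmem]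
        rcases List.mem_filter.mp hmem with ⟨hkst, hPk⟩
        rcases (hmem_st k).mp hkst with ⟨hkj, hgk⟩
        have hPk' : prices[k]! > prices[j]! := by simpa [hP] using hPk
        have hfd : fd prices k = some j := fd_eq_some prices k j hj hkj hgk hPk'
        have hng : goodb prices k (j+1) = false := by
          rw [goodb_false_iff]
          intro hgood
          have := hgood j hkj (by omega)
          omega
        rw [if_pos ⟨by omega, hng⟩]
        unfold specV
        rw [hfd]
      · rw [if_neg hmem, hans k hk]
        by_cases hcase : k < j ∧ goodb prices k j = false
        · rw [if_pos hcase]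
          have hng : goodb prices k (j+1) = false := by
            rw [goodb_false_iff]
            intro hgood
            have h2 := (goodb_false_iff _ _ _).mp hcase.2
            exact h2 (fun m h1 h2 => hgood m h1 (by omega))
          rw [if_pos ⟨by omega, hng⟩]
        · rw [if_neg hcase, if_neg]
          rintro ⟨hk1, hk2⟩
          apply hcase
          rw [goodb_false_iff] at hk2
          have hkj' : k < j := by
            by_contra hkj
            exact hk2 (fun m h1 h2 => by omega)
          refine ⟨hkj', ?_⟩
          rw [goodb_false_iff]
          intro hgk
          have hkst : k ∈ s.2 := (hmem_st k).mpr ⟨hkj', hgk⟩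
          have hnPk : ¬ P k = true := fun h => hmem (List.mem_filter.mpr ⟨hkst, h⟩)
          simp only [hP, decide_eq_true_eq, not_lt] at hnPk
          apply hk2
          intro m h1 h2
          by_cases hmj : m = j
          · subst hmj; exact hnPk
          · exact hgk m h1 (by omega)

lemma solutionB_length (prices : List Int) : (solution_alt prices).length = prices.length := by
  unfold solution_alt
  obtain ⟨_, hlen, _⟩ := invB prices prices.length le_rfl
  rw [foldl_set_length]
  exact hlen

lemma solutionB_getElem? (prices : List Int) (k : Nat) (hk : k < prices.length) :
    (solution_alt prices)[k]? = some (specV prices k) := by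
  unfold solution_alt
  obtain ⟨hst, hlen, hans⟩ := invB prices prices.length le_rfl
  rw [foldl_set_getElem? _ _ _ k (by omega)]
  by_cases hmem : k ∈ ((List.range prices.length).foldl (stepB prices)
      (List.replicate prices.length 0, [])).2
  · rw [if_pos hmem]
    rw [hst] at hmem
    simp only [List.mem_reverse, List.mem_filter, List.mem_range, goodb_iff] at hmem
    have hnone : fd prices k = none := fd_eq_none prices k hmem.2
    unfold specV
    rw [hnone]
  · rw [if_neg hmem, hans k hk]
    rw [hst] at hmem
    simp only [List.mem_reverse, List.mem_filter, List.mem_range, goodb_iff] at hmem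
    have hng : goodb prices k prices.length = false := by
      rw [goodb_false_iff]
      exact fun h => hmem ⟨hk, h⟩
    rw [if_pos ⟨hk, hng⟩]

-- ===== VERDICT (by name: the statement is the Claim_ definition above) =====
theorem solution_spec : Claim_equal_solution := by
  intro prices _
  unfold Spec_solution
  apply List.ext_getElem?
  intro k
  by_cases hk : k < prices.length
  · rw [solutionA_getElem? prices k hk, solutionB_getElem? prices k hk]
  · rw [List.getElem?_eq_none, List.getElem?_eq_none]
    · rw [solutionB_length]; omega
    · rw [solutionA_length]; omega
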